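-- pv_equiv track=rewrite | github.com/EdwinTh/advent_of_code | AoC_2023/day01/code01.py | collect_all_nrs
-- ===== SOURCE A (Python) =====
-- three_letter = {"one":'1', "two":"2", "six":"6"}
--
-- four_letter = {"four":"4", "five":"5", "nine":"9"}
--
-- five_letter = {"three":"3", "seven":"7", "eight":"8"}
--
-- nrs_list = [str(nr) for nr in range(1,10)]
--
-- def return_nr(str_val, lookup):
--     if str_val in lookup:
--         return lookup[str_val]
--
-- def collect_all_nrs(strval):
--     nrs = []
--     for i in range(len(strval)):
--         nr =  strval[i] if strval[i] in nrs_list else None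
--         three = return_nr(strval[i:min(len(strval),i+3)], three_letter)
--         four = return_nr(strval[i:min(len(strval),i+4)], four_letter)
--         five = return_nr(strval[i:min(len(strval),i+5)], five_letter)
--         if nr is not None: nrs.append(nr)
--         if three is not None: nrs.append(three)
--         if four is not None: nrs.append(four)
--         if five is not None: nrs.append(five)
--     return nrs
-- ===== SOURCE B (Python) =====
-- _TOKENS = [
--     ("one", "1"), ("two", "2"), ("three", "3"), ("four", "4"), ("five", "5"),
--     ("six", "6"), ("seven", "7"), ("eight", "8"), ("nine", "9"),
--     ("1", "1"), ("2", "2"), ("3", "3"), ("4", "4"), ("5", "5"),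
--     ("6", "6"), ("7", "7"), ("8", "8"), ("9", "9"),
-- ]
--
-- def collect_all_nrs(strval):
--     # Per-token scan: record every start position of every token, then sort by
--     # position.  Correct because no token is a prefix of another, so at most
--     # one token starts at any position.
--     occ = []
--     for tok, digit in _TOKENS:
--         k = len(tok)
--         for i in range(len(strval) - k + 1):
--             if strval[i:i + k] == tok:
--                 occ.append((i, digit))
--     occ.sort(key=lambda p: p[0])
--     return [d for _, d in occ]
-- ===== Notes on version B (the rewrite author's own statement) =====
-- stated objective: alternative
-- what changed: A scans each position and probes a digit list plus three fixed-length dicts; B instead scans per token (collecting every start position of each of the 18 tokens via slice comparison) and sorts the occurrences by position, which is correct because no token is a prefix of another so at most one token starts at any position.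
import Mathlib
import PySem

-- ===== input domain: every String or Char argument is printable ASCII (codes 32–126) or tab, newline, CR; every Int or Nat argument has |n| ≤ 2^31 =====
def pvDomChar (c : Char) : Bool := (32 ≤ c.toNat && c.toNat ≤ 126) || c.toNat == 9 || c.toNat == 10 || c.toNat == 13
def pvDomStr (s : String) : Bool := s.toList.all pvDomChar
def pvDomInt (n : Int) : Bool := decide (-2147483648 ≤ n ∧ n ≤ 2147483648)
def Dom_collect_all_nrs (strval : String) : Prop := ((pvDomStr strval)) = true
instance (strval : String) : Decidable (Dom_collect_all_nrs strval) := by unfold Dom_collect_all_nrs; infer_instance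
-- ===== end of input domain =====

-- B replaces A's per-position scan (digit test plus three fixed-length dict lookups)
-- by a per-token scan: collect every start position of each of the 18 tokens, then
-- sort the occurrences by position (objective: alternative algorithm, same cost class).

-- ===== PORT A =====
def pv_three_letter : PySem.Dict String String :=
  PySem.Dict.ofList [("one", "1"), ("two", "2"), ("six", "6")]

def pv_four_letter : PySem.Dict String String :=
  PySem.Dict.ofList [("four", "4"), ("five", "5"), ("nine", "9")]

def pv_five_letter : PySem.Dict String String :=
  PySem.Dict.ofList [("three", "3"), ("seven", "7"), ("eight", "8")]

def pv_nrs_list : List String := (PySem.List.pyRange 1 10 1).map PySem.Int.toStr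

-- return_nr: 'if str_val in lookup: return lookup[str_val]' (falls through to None)
def pv_return_nr (str_val : String) (lookup : PySem.Dict String String) : Option String :=
  if PySem.Dict.contains lookup str_val then PySem.Dict.get? lookup str_val else none

def collect_all_nrs (strval : String) : List String :=
  (PySem.List.pyRange 0 (PySem.Str.len strval) 1).foldl (fun nrs i =>
    -- strval[i]; the index is always in range since i ∈ range(len(strval))
    let chr : String := match PySem.Str.pyGet? strval i with
      | some c => String.ofList [c]
      | none => ""
    let nr : Option String := if chr ∈ pv_nrs_list then some chr else none
    let three := pv_return_nr (PySem.Str.slice strval (some i) (some (min (PySem.Str.len strval) (i + 3)))) pv_three_letter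
    let four := pv_return_nr (PySem.Str.slice strval (some i) (some (min (PySem.Str.len strval) (i + 4)))) pv_four_letter
    let five := pv_return_nr (PySem.Str.slice strval (some i) (some (min (PySem.Str.len strval) (i + 5)))) pv_five_letter
    let nrs := match nr with | some v => nrs ++ [v] | none => nrs
    let nrs := match three with | some v => nrs ++ [v] | none => nrs
    let nrs := match four with | some v => nrs ++ [v] | none => nrs
    let nrs := match five with | some v => nrs ++ [v] | none => nrs
    nrs) []

-- ===== PORT B =====
def pv_tokens : List (String × String) :=
  [("one", "1"), ("two", "2"), ("three", "3"), ("four", "4"), ("five", "5"),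
   ("six", "6"), ("seven", "7"), ("eight", "8"), ("nine", "9"),
   ("1", "1"), ("2", "2"), ("3", "3"), ("4", "4"), ("5", "5"),
   ("6", "6"), ("7", "7"), ("8", "8"), ("9", "9")]

def collect_all_nrs_alt (strval : String) : List String :=
  let occ : List (Int × String) := pv_tokens.foldl (fun occ td =>
    let k := PySem.Str.len td.1
    (PySem.List.pyRange 0 (PySem.Str.len strval - k + 1) 1).foldl (fun occ i =>
      if PySem.Str.slice strval (some i) (some (i + k)) == td.1 then occ ++ [(i, td.2)] else occ)
      occ) []
  (PySem.List.sorted occ (fun p => p.1) false).map (fun p => p.2)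

-- ===== PRECONDITION & SPEC =====
def Spec_collect_all_nrs (strval : String) (out : List String) : Prop := out = collect_all_nrs_alt strval
instance (strval : String) (out : List String) : Decidable (Spec_collect_all_nrs strval out) := by unfold Spec_collect_all_nrs; infer_instance

-- ===== CLAIM (what is proved, stated in full; the proofs are below) =====
def Claim_equal_collect_all_nrs : Prop := ∀ (strval : String), Dom_collect_all_nrs strval → Spec_collect_all_nrs strval (collect_all_nrs strval)

-- ===== LEMMAS AND PROOFS =====

-- per-position option slots of A's loop body (proof-side views of the port's locals)
def pvOptDigit (strval : String) (i : Int) : Option String :=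
  let chr : String := match PySem.Str.pyGet? strval i with
    | some c => String.ofList [c]
    | none => ""
  if chr ∈ pv_nrs_list then some chr else none

def pvOptWord (strval : String) (i : Int) (L : Int) (d : PySem.Dict String String) : Option String :=
  pv_return_nr (PySem.Str.slice strval (some i) (some (min (PySem.Str.len strval) (i + L)))) d

def pvStep (strval : String) (i : Int) : List String :=
  (pvOptDigit strval i).toList ++ ((pvOptWord strval i 3 pv_three_letter).toList ++
    ((pvOptWord strval i 4 pv_four_letter).toList ++ (pvOptWord strval i 5 pv_five_letter).toList))

-- 'token t occurs at position j of s' as a Bool (used only by the proofs)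
def pvPref (s : List Char) (j : Nat) (t : String) : Bool := t.toList.isPrefixOf (s.drop j)

-- the tokens firing at position j, in pv_tokens order, tagged with the position
def pvHits (s : List Char) (j : Nat) : List (Int × String) :=
  (pv_tokens.filter (fun td => pvPref s j td.1)).map (fun td => ((j : Int), td.2))

-- the tokens of A's four lookup groups: digits, 3-letter, 4-letter, 5-letter words
def pvG1 : List (String × String) :=
  [("1", "1"), ("2", "2"), ("3", "3"), ("4", "4"), ("5", "5"),
   ("6", "6"), ("7", "7"), ("8", "8"), ("9", "9")]
def pvG3 : List (String × String) := [("one", "1"), ("two", "2"), ("six", "6")]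
def pvG4 : List (String × String) := [("four", "4"), ("five", "5"), ("nine", "9")]
def pvG5 : List (String × String) := [("three", "3"), ("seven", "7"), ("eight", "8")]

lemma pv_groups_perm : (pvG1 ++ (pvG3 ++ (pvG4 ++ pvG5))).Perm pv_tokens := by decide

-- no token is a prefix of another (for distinct tokens): at most one token fires per position
lemma pv_tokens_prefix_free :
    ∀ a ∈ pv_tokens, ∀ b ∈ pv_tokens, a.1.toList <+: b.1.toList → a = b := by decide

lemma pv_tokens_nodup : pv_tokens.Nodup := by decide

lemma pvPref_unique (s : List Char) (j : Nat) :
    ∀ a ∈ pv_tokens, ∀ b ∈ pv_tokens, pvPref s j a.1 → pvPref s j b.1 → a = b := by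
  intro a ha b hb hpa hpb
  rw [pvPref, List.isPrefixOf_iff_prefix] at hpa hpb
  rcases List.prefix_or_prefix_of_prefix hpa hpb with h | h
  · exact pv_tokens_prefix_free a ha b hb h
  · exact (pv_tokens_prefix_free b hb a ha h).symm

lemma pvPref_excl (s : List Char) (j : Nat) {a b : String × String}
    (ha : a ∈ pv_tokens) (hb : b ∈ pv_tokens) (hne : a ≠ b)
    (hpa : pvPref s j a.1 = true) : pvPref s j b.1 = false := by
  by_contra h
  rw [Bool.not_eq_false] at h
  exact hne (pvPref_unique s j a ha b hb hpa h)

-- a filter that keeps at most one element is find?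
lemma pv_filter_eq_find?_toList {α : Type} (l : List α) (p : α → Bool) (hnd : l.Nodup)
    (huniq : ∀ a ∈ l, ∀ b ∈ l, p a → p b → a = b) :
    l.filter p = (l.find? p).toList := by
  induction l with
  | nil => simp
  | cons x t ih =>
    by_cases hx : p x
    · rw [List.filter_cons_of_pos hx, List.find?_cons_of_pos hx]
      have ht : t.filter p = [] := by
        rw [List.filter_eq_nil_iff]
        intro a ha hpa
        have hax : a = x := huniq a (List.mem_cons_of_mem _ ha) x List.mem_cons_self hpa hx
        exact absurd (hax ▸ ha) (List.nodup_cons.mp hnd).1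
      simp [ht]
    · rw [List.filter_cons_of_neg hx, List.find?_cons_of_neg hx]
      exact ih (List.nodup_cons.mp hnd).2
        (fun a ha b hb => huniq a (List.mem_cons_of_mem _ ha) b (List.mem_cons_of_mem _ hb))

lemma pv_perm_eq_of_length_le_one {α : Type} {l1 l2 : List α}
    (h : l1.Perm l2) (hl : l1.length ≤ 1) : l1 = l2 := by
  match l1, hl with
  | [], _ => exact (List.Perm.nil_eq h).symm ▸ rfl
  | [a], _ => exact (List.Perm.eq_singleton h.symm).symm

lemma pv_collect_eq_flatMap (strval : String) :
    collect_all_nrs strval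
      = (PySem.List.pyRange 0 (PySem.Str.len strval) 1).flatMap (pvStep strval) := by
  rw [collect_all_nrs]
  refine Eq.trans (PySem.List.foldl_congr_mem _ _
    (fun (nrs : List String) (i : Int) => nrs ++ pvStep strval i) _ ?_) ?_
  · intro acc x _
    show (let nrs1 := match pvOptDigit strval x with | some v => acc ++ [v] | none => acc
          let nrs2 := match pvOptWord strval x 3 pv_three_letter with | some v => nrs1 ++ [v] | none => nrs1
          let nrs3 := match pvOptWord strval x 4 pv_four_letter with | some v => nrs2 ++ [v] | none => nrs2
          match pvOptWord strval x 5 pv_five_letter with | some v => nrs3 ++ [v] | none => nrs3)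
         = acc ++ pvStep strval x
    rw [pvStep]
    rcases pvOptDigit strval x <;> rcases pvOptWord strval x 3 pv_three_letter <;>
      rcases pvOptWord strval x 4 pv_four_letter <;> rcases pvOptWord strval x 5 pv_five_letter <;> simp
  · rw [PySem.List.foldl_append_eq_flatMap]
    rfl

-- the slice strval[i:min(len,i+L)] read as a list of characters
lemma pv_slice_key_toList (strval : String) (i L : Int) (h0 : 0 ≤ i) (hL : 0 ≤ L) :
    (PySem.Str.slice strval (some i) (some (min (PySem.Str.len strval) (i + L)))).toList
      = (strval.toList.drop i.toNat).take L.toNat := by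
  have hmin : (0:Int) ≤ min ((strval.toList.length : Int)) (i + L) := le_min (by positivity) (by omega)
  rw [PySem.Str.toList_slice, PySem.Str.len_eq, PySem.Chars.slice_eq_listSlice,
      PySem.List.slice_toNat strval.toList h0 hmin]
  rcases le_total ((strval.toList.length : Int)) (i + L) with h | h
  · rw [min_eq_left h,
        List.take_of_length_le (by simp only [List.length_drop]; omega),
        List.take_of_length_le (by simp only [List.length_drop]; omega)]
  · rw [min_eq_right h]
    congr 1
    omega

lemma pv_prefix_iff_take (t : String) (dr : List Char) :
    t.toList.isPrefixOf dr = true ↔ t.toList = dr.take t.toList.length := by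
  rw [List.isPrefixOf_iff_prefix, List.prefix_iff_eq_take]

-- lookups in a three-entry dict
lemma pv_dict3_lookup1 (k1 v1 k2 v2 k3 v3 : String) (h12 : k1 ≠ k2) (h13 : k1 ≠ k3) :
    pv_return_nr k1 ((((PySem.Dict.empty : PySem.Dict String String).insert k1 v1).insert k2 v2).insert k3 v3)
      = some v1 := by
  rw [pv_return_nr, PySem.Dict.get?_insert_of_ne _ _ h13, PySem.Dict.get?_insert_of_ne _ _ h12,
      PySem.Dict.get?_insert_self]
  simp [PySem.Dict.contains_insert]

lemma pv_dict3_lookup2 (k1 v1 k2 v2 k3 v3 : String) (h23 : k2 ≠ k3) :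
    pv_return_nr k2 ((((PySem.Dict.empty : PySem.Dict String String).insert k1 v1).insert k2 v2).insert k3 v3)
      = some v2 := by
  rw [pv_return_nr, PySem.Dict.get?_insert_of_ne _ _ h23, PySem.Dict.get?_insert_self]
  simp [PySem.Dict.contains_insert]

lemma pv_dict3_lookup3 (k1 v1 k2 v2 k3 v3 : String) :
    pv_return_nr k3 ((((PySem.Dict.empty : PySem.Dict String String).insert k1 v1).insert k2 v2).insert k3 v3)
      = some v3 := by
  rw [pv_return_nr, PySem.Dict.get?_insert_self]
  simp

lemma pv_dict3_lookup_none (k k1 v1 k2 v2 k3 v3 : String) (h1 : k ≠ k1) (h2 : k ≠ k2) (h3 : k ≠ k3) :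
    pv_return_nr k ((((PySem.Dict.empty : PySem.Dict String String).insert k1 v1).insert k2 v2).insert k3 v3)
      = none := by
  rw [pv_return_nr]
  simp [pysem, PySem.Dict.contains_insert, h1, h2, h3]

-- A's three/four/five-letter slot: the first fired word of its group (as a filter)
lemma pv_slot_word (strval : String) (i : Int) (h0 : 0 ≤ i)
    (L : Int) (hL : 0 ≤ L) (w1 w2 w3 : String × String) (d : PySem.Dict String String)
    (hd : d = (((PySem.Dict.empty : PySem.Dict String String).insert w1.1 w1.2).insert w2.1 w2.2).insert w3.1 w3.2)
    (hm1 : w1 ∈ pv_tokens) (hm2 : w2 ∈ pv_tokens) (hm3 : w3 ∈ pv_tokens)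
    (hl1 : w1.1.toList.length = L.toNat) (hl2 : w2.1.toList.length = L.toNat)
    (hl3 : w3.1.toList.length = L.toNat)
    (hne12 : w1 ≠ w2) (hne13 : w1 ≠ w3) (hne23 : w2 ≠ w3)
    (hk12 : w1.1 ≠ w2.1) (hk13 : w1.1 ≠ w3.1) (hk23 : w2.1 ≠ w3.1) :
    (pvOptWord strval i L d).toList
      = (([w1, w2, w3].filter (fun td => pvPref strval.toList i.toNat td.1)).map (fun td => td.2)) := by
  have hkey : (PySem.Str.slice strval (some i) (some (min (PySem.Str.len strval) (i + L)))).toList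
      = (strval.toList.drop i.toNat).take L.toNat := pv_slice_key_toList strval i L h0 hL
  rw [pvOptWord]
  by_cases h1 : pvPref strval.toList i.toNat w1.1
  · have h2 := pvPref_excl strval.toList i.toNat hm1 hm2 hne12 h1
    have h3 := pvPref_excl strval.toList i.toNat hm1 hm3 hne13 h1
    have e1 : PySem.Str.slice strval (some i) (some (min (PySem.Str.len strval) (i + L))) = w1.1 := by
      rw [← String.toList_inj, hkey]
      rw [pvPref, pv_prefix_iff_take, hl1] at h1
      exact h1.symm
    rw [e1, hd, pv_dict3_lookup1 _ _ _ _ _ _ hk12 hk13]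
    simp [h1, h2, h3]
  · by_cases h2 : pvPref strval.toList i.toNat w2.1
    · have h3 := pvPref_excl strval.toList i.toNat hm2 hm3 hne23 h2
      have e2 : PySem.Str.slice strval (some i) (some (min (PySem.Str.len strval) (i + L))) = w2.1 := by
        rw [← String.toList_inj, hkey]
        rw [pvPref, pv_prefix_iff_take, hl2] at h2
        exact h2.symm
      rw [e2, hd, pv_dict3_lookup2 _ _ _ _ _ _ hk23]
      simp [h1, h2, h3]
    · by_cases h3 : pvPref strval.toList i.toNat w3.1
      · have e3 : PySem.Str.slice strval (some i) (some (min (PySem.Str.len strval) (i + L))) = w3.1 := by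
          rw [← String.toList_inj, hkey]
          rw [pvPref, pv_prefix_iff_take, hl3] at h3
          exact h3.symm
        rw [e3, hd, pv_dict3_lookup3]
        simp [h1, h2, h3]
      · have hne : ∀ w : String × String, w.1.toList.length = L.toNat →
            ¬ pvPref strval.toList i.toNat w.1 →
            PySem.Str.slice strval (some i) (some (min (PySem.Str.len strval) (i + L))) ≠ w.1 := by
          intro w hlw hnp heq
          apply hnp
          rw [pvPref, pv_prefix_iff_take, hlw]
          rw [← String.toList_inj, hkey] at heq
          exact heq.symm
        rw [hd, pv_dict3_lookup_none _ _ _ _ _ _ _ (hne w1 hl1 h1) (hne w2 hl2 h2) (hne w3 hl3 h3)]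
        simp [h1, h2, h3]

lemma pv_nrs_list_eq : pv_nrs_list = ["1", "2", "3", "4", "5", "6", "7", "8", "9"] := by decide

-- A's digit slot: the fired digit of group pvG1 (as a filter)
set_option maxRecDepth 8000 in
lemma pv_slot_digit (strval : String) (i : Int) (h0 : 0 ≤ i) (hn : i.toNat < strval.toList.length) :
    (pvOptDigit strval i).toList
      = ((pvG1.filter (fun td => pvPref strval.toList i.toNat td.1)).map (fun td => td.2)) := by
  obtain ⟨j, rfl⟩ : ∃ j : Nat, i = (j : Int) := ⟨i.toNat, (Int.toNat_of_nonneg h0).symm⟩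
  simp only [Int.toNat_natCast] at hn ⊢
  have hget : PySem.Str.pyGet? strval (j : Int) = some (strval.toList[j]) := by
    rw [PySem.Str.pyGet?_natCast, List.getElem?_eq_getElem hn]
  have hdrop : strval.toList.drop j
      = strval.toList[j] :: strval.toList.drop (j + 1) := List.drop_eq_getElem_cons hn
  simp only [pvOptDigit, hget]
  simp only [pvPref, pvG1, hdrop, List.filter_cons, List.filter_nil]
  generalize strval.toList[j] = c
  by_cases e1 : c = '1'; · subst e1; simp [pv_nrs_list_eq]
  by_cases e2 : c = '2'; · subst e2; simp [pv_nrs_list_eq]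
  by_cases e3 : c = '3'; · subst e3; simp [pv_nrs_list_eq]
  by_cases e4 : c = '4'; · subst e4; simp [pv_nrs_list_eq]
  by_cases e5 : c = '5'; · subst e5; simp [pv_nrs_list_eq]
  by_cases e6 : c = '6'; · subst e6; simp [pv_nrs_list_eq]
  by_cases e7 : c = '7'; · subst e7; simp [pv_nrs_list_eq]
  by_cases e8 : c = '8'; · subst e8; simp [pv_nrs_list_eq]
  by_cases e9 : c = '9'; · subst e9; simp [pv_nrs_list_eq]
  have hmem : String.ofList [c] ∉ pv_nrs_list := by
    rw [pv_nrs_list_eq]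
    simp only [List.mem_cons, List.not_mem_nil, or_false, ← String.toList_inj, String.toList_ofList]
    simp_all
  simp [hmem, Ne.symm e1, Ne.symm e2, Ne.symm e3, Ne.symm e4, Ne.symm e5, Ne.symm e6,
    Ne.symm e7, Ne.symm e8, Ne.symm e9]

-- combining the four slots: A's per-position output is the fired tokens' digits
lemma pv_step_eq_hits (strval : String) (i : Int) (h0 : 0 ≤ i)
    (hn : i.toNat < strval.toList.length) :
    pvStep strval i = (pvHits strval.toList i.toNat).map (fun p => p.2) := by
  have hsub : ∀ x ∈ pvG1 ++ (pvG3 ++ (pvG4 ++ pvG5)), x ∈ pv_tokens :=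
    fun x hx => pv_groups_perm.mem_iff.mp hx
  have hG : pvStep strval i
      = (((pvG1 ++ (pvG3 ++ (pvG4 ++ pvG5))).filter
          (fun td => pvPref strval.toList i.toNat td.1)).map (fun td => td.2)) := by
    rw [pvStep, pv_slot_digit strval i h0 hn,
        pv_slot_word strval i h0 3 (by omega) ("one", "1") ("two", "2") ("six", "6")
          pv_three_letter (by decide) (by decide) (by decide) (by decide) (by decide)
          (by decide) (by decide) (by decide) (by decide) (by decide) (by decide)
          (by decide) (by decide),
        pv_slot_word strval i h0 4 (by omega) ("four", "4") ("five", "5") ("nine", "9")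
          pv_four_letter (by decide) (by decide) (by decide) (by decide) (by decide)
          (by decide) (by decide) (by decide) (by decide) (by decide) (by decide)
          (by decide) (by decide),
        pv_slot_word strval i h0 5 (by omega) ("three", "3") ("seven", "7") ("eight", "8")
          pv_five_letter (by decide) (by decide) (by decide) (by decide) (by decide)
          (by decide) (by decide) (by decide) (by decide) (by decide) (by decide)
          (by decide) (by decide)]
    simp only [List.filter_append, List.map_append, pvG1, pvG3, pvG4, pvG5]
  have hcat := pv_filter_eq_find?_toList (pvG1 ++ (pvG3 ++ (pvG4 ++ pvG5)))
    (fun td => pvPref strval.toList i.toNat td.1) (by decide)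
    (fun a ha b hb => pvPref_unique strval.toList i.toNat a (hsub a ha) b (hsub b hb))
  have hperm : ((pvG1 ++ (pvG3 ++ (pvG4 ++ pvG5))).filter
        (fun td => pvPref strval.toList i.toNat td.1)).Perm
      (pv_tokens.filter (fun td => pvPref strval.toList i.toNat td.1)) :=
    List.Perm.filter _ pv_groups_perm
  have hlen : ((pvG1 ++ (pvG3 ++ (pvG4 ++ pvG5))).filter
        (fun td => pvPref strval.toList i.toNat td.1)).length ≤ 1 := by
    rw [hcat]
    cases (pvG1 ++ (pvG3 ++ (pvG4 ++ pvG5))).find?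
      (fun td => pvPref strval.toList i.toNat td.1) <;> simp
  rw [hG, pv_perm_eq_of_length_le_one hperm hlen, pvHits, List.map_map]
  rfl

-- B's occurrence loop as a flatMap of per-token filtered ranges
lemma pv_alt_occ_eq (strval : String) :
    collect_all_nrs_alt strval
      = (PySem.List.sorted (pv_tokens.flatMap (fun td =>
          ((PySem.List.pyRange 0 (PySem.Str.len strval - PySem.Str.len td.1 + 1) 1).filter
            (fun i => PySem.Str.slice strval (some i) (some (i + PySem.Str.len td.1)) == td.1)).map
              (fun i => (i, td.2)))) (fun p => p.1) false).map (fun p => p.2) := by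
  rw [collect_all_nrs_alt]
  suffices h : (pv_tokens.foldl (fun occ td =>
      let k := PySem.Str.len td.1
      (PySem.List.pyRange 0 (PySem.Str.len strval - k + 1) 1).foldl (fun occ i =>
        if PySem.Str.slice strval (some i) (some (i + k)) == td.1 then occ ++ [(i, td.2)] else occ)
        occ) ([] : List (Int × String)))
      = pv_tokens.flatMap (fun td =>
          ((PySem.List.pyRange 0 (PySem.Str.len strval - PySem.Str.len td.1 + 1) 1).filter
            (fun i => PySem.Str.slice strval (some i) (some (i + PySem.Str.len td.1)) == td.1)).map
              (fun i => (i, td.2))) by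
    rw [h]
  refine Eq.trans (PySem.List.foldl_congr_mem _ _
    (fun (occ : List (Int × String)) td => occ ++
      ((PySem.List.pyRange 0 (PySem.Str.len strval - PySem.Str.len td.1 + 1) 1).filter
        (fun i => PySem.Str.slice strval (some i) (some (i + PySem.Str.len td.1)) == td.1)).map
          (fun i => (i, td.2))) _ ?_) ?_
  · intro acc td _
    exact PySem.List.foldl_append_if _ _ _ _
  · rw [PySem.List.foldl_append_eq_flatMap]
    rfl

lemma pv_tokens_len_pos : ∀ td ∈ pv_tokens, 0 < td.1.toList.length := by decide

-- per token: the bounded scan over range(len - k + 1) equals a scan over all positions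
lemma pv_token_range (strval : String) (td : String × String) (htd : td ∈ pv_tokens) :
    ((PySem.List.pyRange 0 (PySem.Str.len strval - PySem.Str.len td.1 + 1) 1).filter
        (fun i => PySem.Str.slice strval (some i) (some (i + PySem.Str.len td.1)) == td.1))
      = ((PySem.List.pyRange 0 ((strval.toList.length : Int)) 1).filter
          (fun i => pvPref strval.toList i.toNat td.1)) := by
  have hLpos := pv_tokens_len_pos td htd
  have hcond : ∀ i : Int, 0 ≤ i →
      ((PySem.Str.slice strval (some i) (some (i + PySem.Str.len td.1)) == td.1)
        = pvPref strval.toList i.toNat td.1) := by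
    intro i hi
    rw [Bool.eq_iff_iff, beq_iff_eq, pvPref, pv_prefix_iff_take, ← String.toList_inj,
        PySem.Str.toList_slice, PySem.Str.len_eq, PySem.Chars.slice_eq_listSlice,
        PySem.List.slice_toNat strval.toList hi (by omega)]
    have he : (i + (td.1.toList.length : Int)).toNat - i.toNat = td.1.toList.length := by omega
    rw [he]
    exact ⟨fun h => h.symm, fun h => h.symm⟩
  have hpref_le : ∀ i : Int, 0 ≤ i → pvPref strval.toList i.toNat td.1 = true →
      (i : Int) + (td.1.toList.length : Int) ≤ (strval.toList.length : Int) := by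
    intro i hi hp
    rw [pvPref, List.isPrefixOf_iff_prefix] at hp
    have := hp.length_le
    simp only [List.length_drop] at this
    omega
  simp only [PySem.Str.len_eq]
  rcases le_total ((strval.toList.length : Int) - (td.1.toList.length : Int) + 1) 0 with hm | hm
  · rw [PySem.List.pyRange_one_eq_nil (by omega), List.filter_nil]
    symm
    rw [List.filter_eq_nil_iff]
    intro i hi
    rw [PySem.List.mem_pyRange_one] at hi
    rw [Bool.not_eq_true]
    by_contra h
    rw [Bool.not_eq_false] at h
    exact absurd (hpref_le i (by omega) h) (by omega)
  · rw [PySem.List.pyRange_one_append 0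
        ((strval.toList.length : Int) - (td.1.toList.length : Int) + 1)
        ((strval.toList.length : Int)) (by omega) (by omega), List.filter_append]
    have htail : (PySem.List.pyRange
        ((strval.toList.length : Int) - (td.1.toList.length : Int) + 1)
        ((strval.toList.length : Int)) 1).filter
          (fun i => pvPref strval.toList i.toNat td.1) = [] := by
      rw [List.filter_eq_nil_iff]
      intro i hi
      rw [PySem.List.mem_pyRange_one] at hi
      rw [Bool.not_eq_true]
      by_contra h
      rw [Bool.not_eq_false] at h
      exact absurd (hpref_le i (by omega) h) (by omega)
    rw [htail, List.append_nil]
    refine List.filter_congr ?_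
    intro i hi
    rw [PySem.List.mem_pyRange_one] at hi
    exact hcond i (by omega)

lemma pv_filter_map_eq_flatMap {α γ : Type} (l : List α) (p : α → Bool) (f : α → γ) :
    (l.filter p).map f = l.flatMap (fun x => if p x then [f x] else []) := by
  induction l with
  | nil => rfl
  | cons a t ih => by_cases h : p a <;> simp [h, ih]

lemma pv_flatMap_append_perm {α γ : Type} (l : List α) (u v : α → List γ) :
    (l.flatMap fun b => u b ++ v b).Perm (l.flatMap u ++ l.flatMap v) := by
  induction l with
  | nil => simp
  | cons a t ih =>
    simp only [List.flatMap_cons]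
    refine List.Perm.trans (List.Perm.append_left _ ih) ?_
    simp only [List.append_assoc]
    refine List.Perm.append_left (u a) ?_
    rw [← List.append_assoc, ← List.append_assoc]
    exact List.Perm.append_right _ List.perm_append_comm

lemma pv_flatMap_swap_perm {α β γ : Type} (l1 : List α) (l2 : List β) (g : α → β → List γ) :
    (l1.flatMap fun a => l2.flatMap (g a)).Perm
      (l2.flatMap fun b => l1.flatMap (fun a => g a b)) := by
  induction l1 with
  | nil => simp
  | cons a t ih =>
    simp only [List.flatMap_cons]
    refine List.Perm.trans (List.Perm.append_left _ ih) ?_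
    exact (pv_flatMap_append_perm l2 (g a) _).symm

lemma pv_pairwise_of_len_le_one {γ : Type} {R : γ → γ → Prop} {l : List γ}
    (h : l.length ≤ 1) : l.Pairwise R := by
  match l, h with
  | [], _ => exact .nil
  | [a], _ => simp

lemma pv_hits_fst (s : List Char) (j : Nat) (p : Int × String) (hp : p ∈ pvHits s j) :
    p.1 = (j : Int) := by
  rw [pvHits, List.mem_map] at hp
  rcases hp with ⟨td, _, rfl⟩
  rfl

lemma pv_hits_len (s : List Char) (j : Nat) : (pvHits s j).length ≤ 1 := by
  rw [pvHits, List.length_map,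
      pv_filter_eq_find?_toList _ _ pv_tokens_nodup (pvPref_unique s j)]
  cases pv_tokens.find? (fun td => pvPref s j td.1) <;> simp

lemma pv_T_pairwise (s : List Char) (l : List Int) (hl : l.Pairwise (· < ·))
    (h0 : ∀ i ∈ l, 0 ≤ i) :
    (l.flatMap (fun i => pvHits s i.toNat)).Pairwise (fun p q : Int × String => p.1 < q.1) := by
  induction l with
  | nil => exact .nil
  | cons a t ih =>
    rw [List.flatMap_cons, List.pairwise_append]
    refine ⟨pv_pairwise_of_len_le_one (pv_hits_len s a.toNat),
      ih (List.Pairwise.of_cons hl) (fun i hi => h0 i (List.mem_cons_of_mem _ hi)), ?_⟩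
    intro x hx y hy
    rcases List.mem_flatMap.mp hy with ⟨b, hb, hyb⟩
    rw [pv_hits_fst s a.toNat x hx, pv_hits_fst s b.toNat y hyb]
    have hab : a < b := (List.pairwise_cons.mp hl).1 b hb
    have ha0 := h0 a List.mem_cons_self
    have hb0 := h0 b (List.mem_cons_of_mem _ hb)
    omega

-- ===== VERDICT (by name: the statement is the Claim_ definition above) =====
theorem collect_all_nrs_spec : Claim_equal_collect_all_nrs := by
  intro strval _
  show collect_all_nrs strval = collect_all_nrs_alt strval
  -- A: flatten the per-position scan into position-tagged hits
  have hA : collect_all_nrs strval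
      = ((PySem.List.pyRange 0 ((strval.toList.length : Int)) 1).flatMap
          (fun i => pvHits strval.toList i.toNat)).map (fun p => p.2) := by
    rw [pv_collect_eq_flatMap, PySem.Str.len_eq, List.map_flatMap]
    refine List.flatMap_congr ?_
    intro i hi
    rw [PySem.List.mem_pyRange_one] at hi
    exact pv_step_eq_hits strval i hi.1 (by omega)
  -- B: the occurrence list is a permutation of the same position-tagged hits
  have hocc : (pv_tokens.flatMap (fun td =>
        ((PySem.List.pyRange 0 (PySem.Str.len strval - PySem.Str.len td.1 + 1) 1).filter
          (fun i => PySem.Str.slice strval (some i) (some (i + PySem.Str.len td.1)) == td.1)).map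
            (fun i => (i, td.2))))
      = pv_tokens.flatMap (fun td =>
          (PySem.List.pyRange 0 ((strval.toList.length : Int)) 1).flatMap
            (fun i => if pvPref strval.toList i.toNat td.1 then [(i, td.2)] else [])) := by
    refine List.flatMap_congr ?_
    intro td htd
    rw [pv_token_range strval td htd, pv_filter_map_eq_flatMap]
  have hhits : ∀ i ∈ PySem.List.pyRange 0 ((strval.toList.length : Int)) 1,
      pvHits strval.toList i.toNat
        = pv_tokens.flatMap (fun td =>
            if pvPref strval.toList i.toNat td.1 then [(i, td.2)] else []) := by
    intro i hi
    rw [PySem.List.mem_pyRange_one] at hi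
    rw [pvHits, pv_filter_map_eq_flatMap]
    simp only [Int.toNat_of_nonneg hi.1]
  have hperm : ((PySem.List.pyRange 0 ((strval.toList.length : Int)) 1).flatMap
        (fun i => pvHits strval.toList i.toNat)).Perm
      (pv_tokens.flatMap (fun td =>
        ((PySem.List.pyRange 0 (PySem.Str.len strval - PySem.Str.len td.1 + 1) 1).filter
          (fun i => PySem.Str.slice strval (some i) (some (i + PySem.Str.len td.1)) == td.1)).map
            (fun i => (i, td.2)))) := by
    rw [hocc, List.flatMap_congr hhits]
    exact pv_flatMap_swap_perm
      (PySem.List.pyRange 0 ((strval.toList.length : Int)) 1) pv_tokens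
      (fun i td => if pvPref strval.toList i.toNat td.1 then [(i, td.2)] else [])
  have hpw := pv_T_pairwise strval.toList
    (PySem.List.pyRange 0 ((strval.toList.length : Int)) 1)
    (PySem.List.pairwise_lt_pyRange_one 0 ((strval.toList.length : Int)))
    (fun i hi => (PySem.List.mem_pyRange_one.mp hi).1)
  rw [hA, pv_alt_occ_eq,
      PySem.List.sorted_eq_of_perm_of_pairwise_lt _ _ (fun p => p.1) hperm hpw]
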